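-- pv_equiv track=rewrite | github.com/malittlevina/unimind | native_models/llm_engine.py | _analyze_social_context
-- ===== SOURCE A (Python) =====
-- from typing import Optional, List, Dict, Any, Callable, Union, AsyncGenerator, Tuple
-- from typing import List, Dict, Any, Optional
--
-- def _analyze_social_context(text: str) -> Dict[str, Any]:
--     """Analyze social context from text."""
--     text_lower = text.lower()
--
--     context = {}
--
--     # Analyze formality
--     if any(word in text_lower for word in ["please", "thank you", "sir", "madam"]):
--         context["formality"] = "formal"
--     elif any(word in text_lower for word in ["hey", "hi", "cool"]):
--         context["formality"] = "informal"
--     else: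
--         context["formality"] = "neutral"
--
--     # Analyze urgency
--     if any(word in text_lower for word in ["urgent", "asap", "immediately"]):
--         context["urgency"] = "high"
--     elif any(word in text_lower for word in ["when convenient", "no rush"]):
--         context["urgency"] = "low"
--     else:
--         context["urgency"] = "medium"
--
--     return context
-- ===== SOURCE B (Python) =====
-- # One left-to-right pass over the text positions with boolean hit accumulators
-- # (prefix-match each keyword at every position), instead of four independent
-- # substring searches driving an if/elif chain.
-- _GROUPS = [["please", "thank you", "sir", "madam"],
--            ["hey", "hi", "cool"],
--            ["urgent", "asap", "immediately"],
--            ["when convenient", "no rush"]]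
--
-- def _analyze_social_context(text: str):
--     t = text.lower()
--     hits = [False, False, False, False]
--     for i in range(len(t)):
--         for g, words in enumerate(_GROUPS):
--             if not hits[g]:
--                 hits[g] = any(t.startswith(w, i) for w in words)
--     formality = "formal" if hits[0] else ("informal" if hits[1] else "neutral")
--     urgency = "high" if hits[2] else ("low" if hits[3] else "medium")
--     return {"formality": formality, "urgency": urgency}
-- ===== Notes on version B (the rewrite author's own statement) =====
-- stated objective: alternative
-- what changed: Replaces A's four independent substring searches feeding if/elif chains by a single left-to-right scan over text positions that prefix-matches every keyword at each position into four boolean hit accumulators, mapped to labels at the end.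
import Mathlib
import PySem

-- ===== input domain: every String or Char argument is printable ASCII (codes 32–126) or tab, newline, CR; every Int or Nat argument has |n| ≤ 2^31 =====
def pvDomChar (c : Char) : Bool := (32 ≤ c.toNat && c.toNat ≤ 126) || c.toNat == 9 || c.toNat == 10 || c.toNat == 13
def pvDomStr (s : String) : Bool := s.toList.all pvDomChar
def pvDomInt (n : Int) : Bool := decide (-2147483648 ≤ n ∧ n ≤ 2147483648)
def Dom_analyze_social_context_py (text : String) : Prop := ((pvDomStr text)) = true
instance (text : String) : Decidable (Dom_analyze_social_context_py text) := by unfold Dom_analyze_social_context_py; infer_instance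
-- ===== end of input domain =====

-- B replaces A's four independent substring searches + if/elif chains by ONE left-to-right
-- scan over text positions with four boolean hit accumulators (objective: alternative, same cost).

-- ===== PORT A =====
def analyze_social_context_py (text : String) : List (String × String) :=
  let text_lower := PySem.Str.lower text
  let context : PySem.Dict String String := PySem.Dict.empty
  let context :=
    if ["please", "thank you", "sir", "madam"].any (fun word => PySem.Str.isIn word text_lower) then
      PySem.Dict.insert context "formality" "formal"
    else if ["hey", "hi", "cool"].any (fun word => PySem.Str.isIn word text_lower) then
      PySem.Dict.insert context "formality" "informal"
    else
      PySem.Dict.insert context "formality" "neutral"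
  let context :=
    if ["urgent", "asap", "immediately"].any (fun word => PySem.Str.isIn word text_lower) then
      PySem.Dict.insert context "urgency" "high"
    else if ["when convenient", "no rush"].any (fun word => PySem.Str.isIn word text_lower) then
      PySem.Dict.insert context "urgency" "low"
    else
      PySem.Dict.insert context "urgency" "medium"
  context.items

-- ===== PORT B =====
-- the four keyword groups of Source B
def pvGroup0 : List String := ["please", "thank you", "sir", "madam"]
def pvGroup1 : List String := ["hey", "hi", "cool"]
def pvGroup2 : List String := ["urgent", "asap", "immediately"]
def pvGroup3 : List String := ["when convenient", "no rush"]

-- does some word of the group start at this position (suffix) of the text?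
def pvHitAt (words : List String) (tail : List Char) : Bool :=
  words.any (fun w => PySem.Chars.startswith tail w.toList)

-- the position loop: walk the suffixes of the lowered text, OR-ing hits per group
def pvScan : List Char → Bool × Bool × Bool × Bool → Bool × Bool × Bool × Bool
  | [], hits => hits
  | c :: rest, (h0, h1, h2, h3) =>
      pvScan rest (h0 || pvHitAt pvGroup0 (c :: rest),
                   h1 || pvHitAt pvGroup1 (c :: rest),
                   h2 || pvHitAt pvGroup2 (c :: rest),
                   h3 || pvHitAt pvGroup3 (c :: rest))

def analyze_social_context_py_alt (text : String) : List (String × String) :=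
  let t := PySem.Str.lower text
  let hits := pvScan t.toList (false, false, false, false)
  [("formality", if hits.1 then "formal" else if hits.2.1 then "informal" else "neutral"),
   ("urgency", if hits.2.2.1 then "high" else if hits.2.2.2 then "low" else "medium")]

-- ===== PRECONDITION & SPEC =====
def Spec_analyze_social_context_py (text : String) (out : List (String × String)) : Prop := out = analyze_social_context_py_alt text
instance (text : String) (out : List (String × String)) : Decidable (Spec_analyze_social_context_py text out) := by unfold Spec_analyze_social_context_py; infer_instance

-- ===== CLAIM =====
def Claim_equal_analyze_social_context_py : Prop := ∀ (text : String), Dom_analyze_social_context_py text → Spec_analyze_social_context_py text (analyze_social_context_py text)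

-- ===== LEMMAS AND PROOFS =====

-- a keyword occurs in c::rest iff it starts there or occurs in rest
theorem isIn_cons (w : List Char) (c : Char) (rest : List Char) :
    PySem.Chars.isIn w (c :: rest) =
      (PySem.Chars.startswith (c :: rest) w || PySem.Chars.isIn w rest) := by
  rw [Bool.eq_iff_iff]
  simp [PySem.Chars.isIn_iff_infix, PySem.Chars.startswith_iff, List.infix_cons_iff,
        Bool.or_eq_true]

theorem hitAt_or (words : List String) (c : Char) (rest : List Char) :
    words.any (fun w => PySem.Chars.isIn w.toList (c :: rest)) =
      (pvHitAt words (c :: rest) || words.any (fun w => PySem.Chars.isIn w.toList rest)) := by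
  induction words with
  | nil => simp [pvHitAt]
  | cons x xs ih =>
      simp only [List.any_cons, pvHitAt, isIn_cons] at *
      rw [ih]
      rw [Bool.eq_iff_iff]
      simp only [Bool.or_eq_true]
      tauto

-- the scan computes, per group, "initial hit OR the keyword occurs somewhere in s"
theorem pvScan_eq (s : List Char) (h0 h1 h2 h3 : Bool) :
    pvScan s (h0, h1, h2, h3) =
      (h0 || pvGroup0.any (fun w => PySem.Chars.isIn w.toList s),
       h1 || pvGroup1.any (fun w => PySem.Chars.isIn w.toList s),
       h2 || pvGroup2.any (fun w => PySem.Chars.isIn w.toList s),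
       h3 || pvGroup3.any (fun w => PySem.Chars.isIn w.toList s)) := by
  induction s generalizing h0 h1 h2 h3 with
  | nil =>
      have e0 : pvGroup0.any (fun w => PySem.Chars.isIn w.toList []) = false := by decide
      have e1 : pvGroup1.any (fun w => PySem.Chars.isIn w.toList []) = false := by decide
      have e2 : pvGroup2.any (fun w => PySem.Chars.isIn w.toList []) = false := by decide
      have e3 : pvGroup3.any (fun w => PySem.Chars.isIn w.toList []) = false := by decide
      simp [pvScan, e0, e1, e2, e3]
  | cons c rest ih =>
      rw [pvScan, ih]
      simp only [hitAt_or]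
      simp [Bool.or_assoc]

-- ===== VERDICT =====
theorem analyze_social_context_py_spec : Claim_equal_analyze_social_context_py := by
  intro text _
  unfold Spec_analyze_social_context_py analyze_social_context_py analyze_social_context_py_alt
  dsimp only
  rw [pvScan_eq]
  simp only [Bool.false_or, pvGroup0, pvGroup1, pvGroup2, pvGroup3]
  simp only [PySem.Str.isIn_eq]
  split_ifs <;> rfl
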